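-- pv_equiv track=rewrite | github.com/NeLy-EPFL/poseforge | src/biomechpose/pose_estimation/keypoints_3d/visualizer.py | _get_skeleton_connections_standalone
-- ===== SOURCE A (Python) =====
-- def _get_skeleton_connections_standalone(keypoints_order: list[str]) -> list[tuple[int, int]]:
--     """Define skeleton connections between keypoints on the same leg (excluding antennae)"""
--     connections = []
--
--     # Group keypoints by leg (first two characters) - exclude last 2 antennae
--     leg_groups = {}
--     leg_keypoints = keypoints_order[:-2]  # Exclude last 2 antennae keypoints
--
--     for i, keypoint_name in enumerate(leg_keypoints):
--         leg_id = keypoint_name[:2]  # First two characters identify the leg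
--         if leg_id not in leg_groups:
--             leg_groups[leg_id] = []
--         leg_groups[leg_id].append(i)
--
--     # Connect consecutive keypoints within each leg
--     for leg_id, keypoint_indices in leg_groups.items():
--         # Sort indices to ensure proper proximal-to-distal order
--         keypoint_indices.sort()
--         # Connect consecutive keypoints in this leg
--         for i in range(len(keypoint_indices) - 1):
--             connections.append((keypoint_indices[i], keypoint_indices[i + 1]))
--
--     return connections
-- ===== SOURCE B (Python) =====
-- def _get_skeleton_connections_standalone(keypoints_order: list[str]) -> list[tuple[int, int]]:
--     """Single pass: track each leg's last-seen index and append edges incrementally,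
--     bucketed per leg in first-appearance order; no index lists, no sort."""
--     last_index = {}
--     edges = {}
--     for i, name in enumerate(keypoints_order[:-2]):
--         leg = name[:2]
--         if leg in last_index:
--             edges[leg].append((last_index[leg], i))
--         else:
--             edges[leg] = []
--         last_index[leg] = i
--     result = []
--     for bucket in edges.values():
--         result += bucket
--     return result
-- ===== Notes on version B (the rewrite author's own statement) =====
-- stated objective: alternative
-- what changed: Replaces A's two-phase collect-indices-per-leg-then-sort-and-zip-consecutive structure with a single incremental pass that keeps each leg's last-seen index and appends edges directly into per-leg buckets (dropping the redundant sort); the buckets are concatenated in first-appearance order.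
import Mathlib
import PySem

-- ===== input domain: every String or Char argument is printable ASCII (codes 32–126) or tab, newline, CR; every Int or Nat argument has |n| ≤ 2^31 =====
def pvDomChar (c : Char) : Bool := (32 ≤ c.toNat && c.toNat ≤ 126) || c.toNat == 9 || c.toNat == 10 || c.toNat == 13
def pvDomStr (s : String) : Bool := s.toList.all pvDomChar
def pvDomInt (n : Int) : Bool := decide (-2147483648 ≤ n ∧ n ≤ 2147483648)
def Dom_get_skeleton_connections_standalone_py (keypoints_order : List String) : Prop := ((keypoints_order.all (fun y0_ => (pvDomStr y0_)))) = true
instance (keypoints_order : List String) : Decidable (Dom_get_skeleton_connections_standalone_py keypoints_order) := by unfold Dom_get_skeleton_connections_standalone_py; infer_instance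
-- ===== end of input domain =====

-- B replaces A's collect-indices-then-sort-then-zip-consecutive phases with one pass keeping
-- each leg's last index and building per-leg edge buckets incrementally (objective: alternative).

-- shared key extraction: keypoint_name[:2] (both Pythons compute it identically)
def pvLegId (s : String) : List Char := PySem.List.slice s.toList none (some 2)

-- ===== PORT A =====
def get_skeleton_connections_standalone_py (keypoints_order : List String) : List (Int × Int) :=
  -- leg_keypoints = keypoints_order[:-2]
  let leg_keypoints := PySem.List.slice keypoints_order none (some (-2))
  -- 'if leg_id not in leg_groups: leg_groups[leg_id] = []' + '.append(i)' is exactly Dict.modify leg_id [] (· ++ [i])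
  let leg_groups : PySem.Dict (List Char) (List Int) :=
    (PySem.List.enumerate leg_keypoints).foldl
      (fun d p => d.modify (pvLegId p.2) [] (· ++ [p.1])) PySem.Dict.empty
  leg_groups.items.foldl
    (fun connections kv =>
      let keypoint_indices := PySem.List.sorted kv.2 (fun x => x)
      -- for i in range(len(keypoint_indices) - 1): append (kp[i], kp[i+1]); indices are always in
      -- range here, so Python never raises and pyGetD's default is never used
      (PySem.List.pyRange 0 ((keypoint_indices.length : Int) - 1)).foldl
        (fun connections i =>
          connections ++ [(PySem.List.pyGetD keypoint_indices i 0,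
                           PySem.List.pyGetD keypoint_indices (i + 1) 0)])
        connections)
    []

-- ===== PORT B =====
def get_skeleton_connections_standalone_py_alt (keypoints_order : List String) : List (Int × Int) :=
  let st :=
    (PySem.List.enumerate (PySem.List.slice keypoints_order none (some (-2)))).foldl
      (fun (st : PySem.Dict (List Char) Int × PySem.Dict (List Char) (List (Int × Int))) p =>
        let leg := pvLegId p.2
        let edges :=
          if st.1.contains leg then
            -- edges[leg].append((last_index[leg], i)); leg is present, guarded, defaults unused
            st.2.modify leg [] (· ++ [(st.1.getD leg 0, p.1)])
          else
            st.2.insert leg []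
        (st.1.insert leg p.1, edges))
      (PySem.Dict.empty, PySem.Dict.empty)
  st.2.values.foldl (fun result bucket => result ++ bucket) []

-- ===== PRECONDITION & SPEC =====
def Spec_get_skeleton_connections_standalone_py (keypoints_order : List String) (out : List (Int × Int)) : Prop := out = get_skeleton_connections_standalone_py_alt keypoints_order
instance (keypoints_order : List String) (out : List (Int × Int)) : Decidable (Spec_get_skeleton_connections_standalone_py keypoints_order out) := by unfold Spec_get_skeleton_connections_standalone_py; infer_instance

-- ===== CLAIM (what is proved, stated in full; the proofs are below) =====
def Claim_equal_get_skeleton_connections_standalone_py : Prop := ∀ (keypoints_order : List String), Dom_get_skeleton_connections_standalone_py keypoints_order → Spec_get_skeleton_connections_standalone_py keypoints_order (get_skeleton_connections_standalone_py keypoints_order)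

-- ===== LEMMAS AND PROOFS =====

-- consecutive pairs of a list: the common normal form of both sides
def pvAdj {α : Type} (xs : List α) : List (α × α) := xs.zip xs.tail

-- indices of l whose keypoint has leg id k, in order
def pvIdxs (l : List (Int × String)) (k : List Char) : List Int :=
  (l.filter (fun p => pvLegId p.2 == k)).map (·.1)

-- B's loop step (definitionally the lambda inside the port of B)
def pvStep (st : PySem.Dict (List Char) Int × PySem.Dict (List Char) (List (Int × Int)))
    (p : Int × String) :
    PySem.Dict (List Char) Int × PySem.Dict (List Char) (List (Int × Int)) :=
  let leg := pvLegId p.2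
  let edges :=
    if st.1.contains leg then
      st.2.modify leg [] (· ++ [(st.1.getD leg 0, p.1)])
    else
      st.2.insert leg []
  (st.1.insert leg p.1, edges)

lemma pvAdj_append_singleton {α : Type} (xs : List α) (x : α) :
    pvAdj (xs ++ [x]) = pvAdj xs ++ (match xs.getLast? with
      | none => [] | some a => [(a, x)]) := by
  induction xs with
  | nil => rfl
  | cons y ys ih =>
    cases ys with
    | nil => rfl
    | cons z zs =>
      simp only [pvAdj, List.cons_append, List.tail_cons, List.zip_cons_cons] at ih ⊢
      rw [ih]
      simp

lemma pvRangePairs_eq_adj (xs : List Int) (acc : List (Int × Int)) :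
    (PySem.List.pyRange 0 ((xs.length : Int) - 1)).foldl
      (fun acc i => acc ++ [(PySem.List.pyGetD xs i 0, PySem.List.pyGetD xs (i + 1) 0)]) acc
    = acc ++ pvAdj xs := by
  rw [PySem.List.foldl_append_singleton_eq_map]
  congr 1
  apply List.ext_getElem
  · simp [PySem.List.length_pyRange_one, pvAdj]
  · intro k h1 h2
    simp only [List.getElem_map, PySem.List.getElem_pyRange_one]
    have hk : k < xs.length - 1 := by
      simp [PySem.List.length_pyRange_one] at h1; omega
    simp only [zero_add]
    have h2' : (k : Int) + 1 = (((k + 1 : Nat)) : Int) := by push_cast; ring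
    rw [h2', PySem.List.pyGetD_natCast, PySem.List.pyGetD_natCast]
    simp [pvAdj, List.getElem_zip, List.getElem_tail, List.getD_eq_getElem?_getD,
      List.getElem?_eq_getElem (by omega : k < xs.length),
      List.getElem?_eq_getElem (by omega : k + 1 < xs.length)]

-- the A-side dict characterisation
lemma A_dict (E : List (Int × String)) :
    (E.foldl (fun (d : PySem.Dict (List Char) (List Int)) p =>
        d.modify (pvLegId p.2) [] (· ++ [p.1])) PySem.Dict.empty).keys
      = PySem.Set.ofList (E.map (fun p => pvLegId p.2))
    ∧ ∀ k, (E.foldl (fun (d : PySem.Dict (List Char) (List Int)) p =>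
        d.modify (pvLegId p.2) [] (· ++ [p.1])) PySem.Dict.empty).getD k []
      = pvIdxs E k := by
  constructor
  · rw [PySem.Dict.keys_foldl_modify_key E (fun p => pvLegId p.2) [] (fun _ p v => v ++ [p.1])]
    rfl
  · intro k
    have hm := List.foldl_map (f := fun p : Int × String => (pvLegId p.2, p.1))
      (g := fun (d : PySem.Dict (List Char) (List Int)) (q : List Char × Int) => d.modify q.1 [] (· ++ [q.2]))
      (l := E) (init := (PySem.Dict.empty : PySem.Dict (List Char) (List Int)))
    rw [← hm, PySem.Dict.getD_foldl_modify_append]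
    simp [pvIdxs, List.filter_map, Function.comp_def]

lemma pvIdxs_pairwise (E : List String) (s : Int) (k : List Char) :
    (pvIdxs (PySem.List.enumerate E s) k).Pairwise (· ≤ ·) := by
  have h := PySem.List.pairwise_lt_enumerate E s
  exact ((h.filter _).map _ (fun a b hab => le_of_lt hab))

lemma sorted_pvIdxs (E : List String) (k : List Char) :
    PySem.List.sorted (pvIdxs (PySem.List.enumerate E) k) (fun x => x)
      = pvIdxs (PySem.List.enumerate E) k :=
  PySem.List.sorted_eq_self_of_pairwise _ _ (pvIdxs_pairwise E 0 k)

lemma A_eq_flatMap (ko : List String) :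
    get_skeleton_connections_standalone_py ko
    = (PySem.Set.ofList ((PySem.List.enumerate (PySem.List.slice ko none (some (-2)))).map
        (fun p => pvLegId p.2))).flatMap
        (fun k => pvAdj (pvIdxs (PySem.List.enumerate (PySem.List.slice ko none (some (-2)))) k)) := by
  obtain ⟨hkeys, hgetD⟩ := A_dict (PySem.List.enumerate (PySem.List.slice ko none (some (-2))))
  show (((PySem.List.enumerate (PySem.List.slice ko none (some (-2)))).foldl
         (fun (d : PySem.Dict (List Char) (List Int)) p => d.modify (pvLegId p.2) [] (· ++ [p.1]))
         PySem.Dict.empty).items).foldl _ [] = _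
  set d := ((PySem.List.enumerate (PySem.List.slice ko none (some (-2)))).foldl
         (fun (d : PySem.Dict (List Char) (List Int)) p => d.modify (pvLegId p.2) [] (· ++ [p.1]))
         PySem.Dict.empty) with hd
  have hnd : d.keys.Nodup := by rw [hkeys]; exact PySem.Set.nodup_ofList _
  rw [PySem.Dict.items_eq_map_keys d hnd []]
  refine Eq.trans (PySem.List.foldl_congr_mem _ _
    (fun (connections : List (Int × Int)) (kv : List Char × List Int) =>
      connections ++ pvAdj (PySem.List.sorted kv.2 (fun x => x))) _
    (fun acc kv _ => pvRangePairs_eq_adj _ acc)) ?_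
  rw [PySem.List.foldl_append_eq_flatMap]
  rw [hkeys]
  simp only [List.nil_append, List.flatMap_map]
  congr 1
  funext k
  rw [hgetD k, sorted_pvIdxs]

lemma pvIdxs_append_singleton (l : List (Int × String)) (p : Int × String) (k : List Char) :
    pvIdxs (l ++ [p]) k = pvIdxs l k ++ (if pvLegId p.2 = k then [p.1] else []) := by
  simp only [pvIdxs, List.filter_append, List.map_append]
  congr 1
  by_cases h : pvLegId p.2 = k
  · have hb : (pvLegId p.2 == k) = true := by simp [h]
    simp [List.filter, hb]
    exact h
  · have hb : (pvLegId p.2 == k) = false := by simp [h]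
    simp [List.filter, hb, h]

lemma pvIdxs_ne_nil_iff (l : List (Int × String)) (k : List Char) :
    pvIdxs l k ≠ [] ↔ k ∈ l.map (fun p => pvLegId p.2) := by
  simp [pvIdxs, List.filter_eq_nil_iff, List.mem_map]

lemma B_inv (l : List (Int × String)) :
    (l.foldl pvStep (PySem.Dict.empty, PySem.Dict.empty)).2.keys
      = PySem.Set.ofList (l.map (fun p => pvLegId p.2))
    ∧ (∀ k, (l.foldl pvStep (PySem.Dict.empty, PySem.Dict.empty)).1.get? k
        = (pvIdxs l k).getLast?)
    ∧ (∀ k, (l.foldl pvStep (PySem.Dict.empty, PySem.Dict.empty)).2.getD k []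
        = pvAdj (pvIdxs l k)) := by
  induction l using List.reverseRecOn with
  | nil =>
    exact ⟨rfl, fun k => rfl, fun k => rfl⟩
  | append_singleton l p ih =>
    obtain ⟨ih1, ih2, ih3⟩ := ih
    rw [List.foldl_append] at *
    set S := l.foldl pvStep (PySem.Dict.empty, PySem.Dict.empty) with hS
    set k0 := pvLegId p.2 with hk0
    have hcont : S.1.contains k0 = (pvIdxs l k0).getLast?.isSome := by
      rw [PySem.Dict.contains_eq_isSome_get?, ih2]
    have hofl : PySem.Set.ofList ((l ++ [p]).map (fun p => pvLegId p.2))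
        = PySem.Set.add (PySem.Set.ofList (l.map (fun p => pvLegId p.2))) k0 := by
      rw [List.map_append, PySem.Set.ofList_eq_foldl, PySem.Set.ofList_eq_foldl,
        List.foldl_append]
      rfl
    have hget : ∀ k, (S.1.insert k0 p.1).get? k = (pvIdxs (l ++ [p]) k).getLast? := by
      intro k
      rw [PySem.Dict.get?_insert, pvIdxs_append_singleton]
      by_cases h : k = k0
      · rw [if_pos h, if_pos h.symm, h, List.getLast?_concat]
      · rw [if_neg h, if_neg (fun hh => h hh.symm), List.append_nil, ih2 k]
    by_cases hc : (pvIdxs l k0) = []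
    · -- leg not seen before: branch inserts an empty bucket
      have hcf : S.1.contains k0 = false := by
        rw [hcont, hc]; rfl
      have hmem : k0 ∉ PySem.Set.ofList (l.map (fun p => pvLegId p.2)) := by
        rw [PySem.Set.mem_ofList]
        exact fun hm => ((pvIdxs_ne_nil_iff l k0).2 hm) hc
      have hc2f : S.2.contains k0 = false := by
        rw [PySem.Dict.contains_eq_decide_mem_keys, ih1]; simpa using hmem
      refine ⟨?_, hget, ?_⟩
      · show (if S.1.contains k0 then _ else S.2.insert k0 []).keys = _
        rw [if_neg (by rw [hcf]; exact Bool.false_ne_true),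
          PySem.Dict.keys_insert_of_not_contains _ _ hc2f, hofl, ih1,
          PySem.Set.add_of_not_mem hmem]
      · intro k
        show (if S.1.contains k0 then _ else S.2.insert k0 []).getD k [] = _
        rw [if_neg (by rw [hcf]; exact Bool.false_ne_true)]
        rw [PySem.Dict.getD_insert, pvIdxs_append_singleton]
        by_cases h : k = k0
        · rw [if_pos h, if_pos h.symm, h, hc]
          rfl
        · rw [if_neg h, if_neg (fun hh => h hh.symm), List.append_nil, ih3 k]
    · -- leg seen before: append one edge to its bucket
      obtain ⟨a, ha⟩ : ∃ a, (pvIdxs l k0).getLast? = some a := by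
        cases hh : (pvIdxs l k0).getLast? with
        | none => exact absurd (List.getLast?_eq_none_iff.1 hh) hc
        | some a => exact ⟨a, rfl⟩
      have hct : S.1.contains k0 = true := by rw [hcont, ha]; rfl
      have hmem : k0 ∈ PySem.Set.ofList (l.map (fun p => pvLegId p.2)) := by
        rw [PySem.Set.mem_ofList]; exact (pvIdxs_ne_nil_iff l k0).1 hc
      have hc2t : S.2.contains k0 = true := by
        rw [PySem.Dict.contains_eq_decide_mem_keys, ih1]; simpa using hmem
      refine ⟨?_, hget, ?_⟩
      · show (if S.1.contains k0 then S.2.modify k0 [] _ else _).keys = _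
        rw [if_pos hct, PySem.Dict.keys_modify, PySem.Dict.keys_insert_of_contains _ _ hc2t,
          hofl, ih1, PySem.Set.add_of_mem hmem]
      · intro k
        show (if S.1.contains k0 then S.2.modify k0 [] _ else _).getD k [] = _
        rw [if_pos hct, PySem.Dict.getD_modify, pvIdxs_append_singleton]
        by_cases h : k = k0
        · rw [if_pos h, if_pos h.symm, h, ih3 k0, pvAdj_append_singleton, ha,
            PySem.Dict.getD_eq_get?_getD, ih2 k0, ha]
          rfl
        · rw [if_neg h, if_neg (fun hh => h hh.symm), List.append_nil, ih3 k]

lemma B_eq_flatMap (ko : List String) :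
    get_skeleton_connections_standalone_py_alt ko
    = (PySem.Set.ofList ((PySem.List.enumerate (PySem.List.slice ko none (some (-2)))).map
        (fun p => pvLegId p.2))).flatMap
        (fun k => pvAdj (pvIdxs (PySem.List.enumerate (PySem.List.slice ko none (some (-2)))) k)) := by
  show ((PySem.List.enumerate (PySem.List.slice ko none (some (-2)))).foldl pvStep
        (PySem.Dict.empty, PySem.Dict.empty)).2.values.foldl
        (fun result bucket => result ++ bucket) [] = _
  obtain ⟨h1, h2, h3⟩ := B_inv (PySem.List.enumerate (PySem.List.slice ko none (some (-2))))
  have hnd : ((PySem.List.enumerate (PySem.List.slice ko none (some (-2)))).foldl pvStep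
      (PySem.Dict.empty, PySem.Dict.empty)).2.keys.Nodup := by
    rw [h1]; exact PySem.Set.nodup_ofList _
  rw [PySem.List.foldl_append_eq_flatten, PySem.Dict.values_eq_map_keys _ hnd [], h1]
  simp only [List.nil_append]
  rw [List.flatMap_def]
  congr 1
  exact List.map_congr_left (fun k _ => h3 k)

-- ===== VERDICT (by name: the statement is the Claim_ definition above) =====
theorem get_skeleton_connections_standalone_py_spec : Claim_equal_get_skeleton_connections_standalone_py := by
  intro ko _
  show get_skeleton_connections_standalone_py ko = get_skeleton_connections_standalone_py_alt ko
  rw [A_eq_flatMap ko, B_eq_flatMap ko]
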